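-- pv_equiv track=rewrite | github.com/21david/Miscellaneous | Exponent Solutions/Busiest Time in The Mall.py | find_busiest_period
-- ===== SOURCE A (Python) =====
-- from typing import List
--
-- def find_busiest_period(data: List[List[int]]) -> int:
--     if len(data) == 1:
--         return data[0][0]
--
--     N = len(data)
--     current_net = 0
--     max_net = -float('inf')
--     busiest_time = -1
--     prev_time = -1
--
--     for i in range(N):
--         time, count, status = data[i]
--
--         if time != prev_time:
--             # We have gone through all arrays of the last timestamp, now check
--             # if the overall change is a new record
--             if current_net > max_net:
--                 max_net = current_net
--                 busiest_time = prev_time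
--
--             # Start over with the next distinct timestamp
--             prev_time = time
--
--         if status == 1:
--             current_net += count
--         else:
--             current_net -= count
--
--     # Check for the last distinct timestamp
--     if current_net > max_net:
--         max_net = current_net
--         busiest_time = time
--
--     return busiest_time
-- ===== SOURCE B (Python) =====
-- def find_busiest_period(data):
--     if len(data) == 1:
--         return data[0][0]
--     # pass 1: build ordered candidate table (timestamp, cumulative net before its group),
--     # seeded implicitly by the initial prev = -1 baseline, closed with the final total
--     candidates = []
--     running = 0
--     prev = -1
--     for time, count, status in data:
--         if time != prev:
--             candidates.append((prev, running))
--             prev = time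
--         running += count if status == 1 else -count
--     candidates.append((prev, running))
--     # pass 2: first candidate achieving the maximum net (strict > keeps earliest)
--     best_t, best_v = candidates[0]
--     for t, v in candidates[1:]:
--         if v > best_v:
--             best_t, best_v = t, v
--     return best_t
-- ===== Notes on version B (the rewrite author's own statement) =====
-- stated objective: alternative
-- what changed: A fuses accumulation and max-tracking in one loop with a -inf sentinel; B first builds an ordered table of (timestamp, cumulative net) group candidates and then selects the first candidate with maximum net in a separate scan.
import Mathlib
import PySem

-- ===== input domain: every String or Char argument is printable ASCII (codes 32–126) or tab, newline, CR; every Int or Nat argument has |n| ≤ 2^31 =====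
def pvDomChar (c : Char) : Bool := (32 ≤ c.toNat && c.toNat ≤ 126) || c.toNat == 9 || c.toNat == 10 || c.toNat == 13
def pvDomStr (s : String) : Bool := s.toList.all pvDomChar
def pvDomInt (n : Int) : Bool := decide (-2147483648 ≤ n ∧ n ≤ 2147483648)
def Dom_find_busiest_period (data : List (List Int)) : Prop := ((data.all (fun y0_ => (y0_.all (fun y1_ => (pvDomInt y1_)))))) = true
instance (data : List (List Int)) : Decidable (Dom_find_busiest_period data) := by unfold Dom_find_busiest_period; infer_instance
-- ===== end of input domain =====

-- B builds the candidate table first and selects afterwards; A tracks the running maximum in the same loop.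
-- ===== PORT A =====
-- -float('inf') is modelled by Option Int: none = -inf (every Int compares greater).
def pvGtOpt (v : Int) (m : Option Int) : Bool :=
  match m with
  | none => true
  | some x => decide (v > x)

-- state: (current_net, max_net, busiest_time, prev_time, time)
def pvStepA (st : Int × Option Int × Int × Int × Int) (row : List Int) :
    Int × Option Int × Int × Int × Int :=
  match row with
  | [time, count, status] =>
    let (cn, mn, bt, pt, _) := st
    let (mn, bt, pt) :=
      if time ≠ pt then
        (if pvGtOpt cn mn then (some cn, pt, time) else (mn, bt, time))
      else (mn, bt, pt)
    let cn := if status = 1 then cn + count else cn - count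
    (cn, mn, bt, pt, time)
  | _ => st  -- unreachable: Python raises on a row not of length 3; Pre_ excludes it

def find_busiest_period (data : List (List Int)) : Int :=
  if data.length = 1 then
    match data with
    | r :: _ => (match r with | x :: _ => x | [] => 0)  -- data[0][0]; [] excluded by Pre_
    | [] => 0
  else
    let (cn, mn, bt, _, time) := data.foldl pvStepA (0, none, -1, -1, 0)
    if pvGtOpt cn mn then time else bt

-- ===== PORT B =====
-- state: (candidates, running, prev)
def pvStepBuild (st : List (Int × Int) × Int × Int) (row : List Int) :
    List (Int × Int) × Int × Int :=
  match row with
  | [time, count, status] =>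
    let (cands, running, prev) := st
    let (cands, prev) :=
      if time ≠ prev then (cands ++ [(prev, running)], time) else (cands, prev)
    let running := if status = 1 then running + count else running - count
    (cands, running, prev)
  | _ => st  -- unreachable under Pre_

def pvSelect (best : Int × Int) (c : Int × Int) : Int × Int :=
  if c.2 > best.2 then c else best

def find_busiest_period_alt (data : List (List Int)) : Int :=
  if data.length = 1 then
    match data with
    | r :: _ => (match r with | x :: _ => x | [] => 0)
    | [] => 0
  else
    let (cands, running, prev) := data.foldl pvStepBuild ([], 0, -1)
    let cands := cands ++ [(prev, running)]
    match cands with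
    | c :: rest => (rest.foldl pvSelect c).1
    | [] => 0  -- unreachable: cands ends with an appended element

-- ===== PRECONDITION & SPEC =====
-- Pre_ excludes exactly the inputs where Python A raises: the empty list (NameError on `time`),
-- a single row that is empty (IndexError on data[0][0]), and, with several rows, any row whose
-- length is not 3 (unpacking ValueError).
def Pre_find_busiest_period (data : List (List Int)) : Prop :=
  data ≠ [] ∧
  (data.length = 1 → data.headD [] ≠ []) ∧
  (data.length ≠ 1 → ∀ r ∈ data, r.length = 3)
instance (data : List (List Int)) : Decidable (Pre_find_busiest_period data) := by
  unfold Pre_find_busiest_period; infer_instance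

def pvWitness_find_busiest_period : List (List Int) := [[1, 2, 1], [1, 1, 0], [3, 5, 1]]

def Spec_find_busiest_period (data : List (List Int)) (out : Int) : Prop := out = find_busiest_period_alt data
instance (data : List (List Int)) (out : Int) : Decidable (Spec_find_busiest_period data out) := by unfold Spec_find_busiest_period; infer_instance

-- ===== CLAIM (what is proved, stated in full; the proofs are below) =====
def Claim_equal_find_busiest_period : Prop := ∀ (data : List (List Int)), Dom_find_busiest_period data → Pre_find_busiest_period data → Spec_find_busiest_period data (find_busiest_period data)

-- ===== LEMMAS AND PROOFS =====

-- A's (max_net, busiest_time) pair, recomputed from a candidate list by the same strict rule.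
def pvSelA (best : Option Int × Int) (c : Int × Int) : Option Int × Int :=
  if pvGtOpt c.2 best.1 then (some c.2, c.1) else best

lemma stepA_cons (cn : Int) (mn : Option Int) (bt pt tm t c s : Int) :
    pvStepA (cn, mn, bt, pt, tm) [t, c, s] =
      ((if s = 1 then cn + c else cn - c),
       (if t = pt then mn else if pvGtOpt cn mn then some cn else mn),
       (if t = pt then bt else if pvGtOpt cn mn then pt else bt),
       (if t = pt then pt else t), t) := by
  simp only [pvStepA]
  by_cases h : t = pt <;> by_cases hg : pvGtOpt cn mn <;> simp [h, hg]

lemma stepBuild_cons (cands : List (Int × Int)) (cn pt t c s : Int) :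
    pvStepBuild (cands, cn, pt) [t, c, s] =
      ((if t = pt then cands else cands ++ [(pt, cn)]),
       (if s = 1 then cn + c else cn - c),
       (if t = pt then pt else t)) := by
  simp only [pvStepBuild]
  by_cases h : t = pt <;> simp [h]

-- relates A's fold state to B's build state
lemma build_invariant (data : List (List Int)) :
    ∀ (cn pt : Int) (mn : Option Int) (bt tm : Int) (cands : List (Int × Int)),
    (∀ r ∈ data, r.length = 3) →
    (mn, bt) = cands.foldl pvSelA (none, -1) →
    ((data.foldl pvStepA (cn, mn, bt, pt, tm)).1
        = (data.foldl pvStepBuild (cands, cn, pt)).2.1 ∧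
     (data.foldl pvStepA (cn, mn, bt, pt, tm)).2.2.2.1
        = (data.foldl pvStepBuild (cands, cn, pt)).2.2 ∧
     (data ≠ [] → (data.foldl pvStepA (cn, mn, bt, pt, tm)).2.2.2.2
        = (data.foldl pvStepA (cn, mn, bt, pt, tm)).2.2.2.1) ∧
     ((data.foldl pvStepA (cn, mn, bt, pt, tm)).2.1,
      (data.foldl pvStepA (cn, mn, bt, pt, tm)).2.2.1)
        = (data.foldl pvStepBuild (cands, cn, pt)).1.foldl pvSelA (none, -1)) := by
  induction data with
  | nil =>
    intro cn pt mn bt tm cands _ h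
    exact ⟨rfl, rfl, by simp, h⟩
  | cons r rest ih =>
    intro cn pt mn bt tm cands hlen h
    obtain ⟨t, c, s, rfl⟩ : ∃ t c s, r = [t, c, s] := by
      have := hlen r (by simp)
      match r, this with
      | [t, c, s], _ => exact ⟨t, c, s, rfl⟩
    have hlen' : ∀ r ∈ rest, r.length = 3 := fun r hr => hlen r (by simp [hr])
    simp only [List.foldl_cons, stepA_cons, stepBuild_cons]
    by_cases ht : t = pt
    · simp only [ht, if_true, ite_self]
      have hih := ih (if s = 1 then cn + c else cn - c) pt mn bt pt cands hlen' h
      refine ⟨hih.1, hih.2.1, fun _ => ?_, hih.2.2.2⟩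
      rcases rest with _ | ⟨r2, rest2⟩
      · simp
      · exact hih.2.2.1 (by simp)
    · simp only [if_neg ht]
      have hsel : ((if pvGtOpt cn mn then (some cn : Option Int) else mn),
                   (if pvGtOpt cn mn then pt else bt))
          = (cands ++ [(pt, cn)]).foldl pvSelA (none, -1) := by
        rw [List.foldl_append, ← h]
        simp only [List.foldl_cons, List.foldl_nil, pvSelA]
        by_cases hg : pvGtOpt cn mn <;> simp [hg]
      have hih := ih (if s = 1 then cn + c else cn - c) t
          (if pvGtOpt cn mn then (some cn) else mn)
          (if pvGtOpt cn mn then pt else bt) t (cands ++ [(pt, cn)]) hlen' hsel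
      refine ⟨hih.1, hih.2.1, fun _ => ?_, hih.2.2.2⟩
      rcases rest with _ | ⟨r2, rest2⟩
      · simp
      · exact hih.2.2.1 (by simp)

-- B's argmax scan computes the pvSelA fold once seeded with the first candidate.
lemma select_eq (rest : List (Int × Int)) :
    ∀ (c : Int × Int),
      rest.foldl pvSelA (some c.2, c.1) =
        (some (rest.foldl pvSelect c).2, (rest.foldl pvSelect c).1) := by
  induction rest with
  | nil => intro c; rfl
  | cons x xs ih =>
    intro c
    simp only [List.foldl_cons, pvSelA, pvSelect, pvGtOpt]
    by_cases hg : x.2 > c.2 <;> simp [hg, ih]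

lemma selA_head (l : List (Int × Int)) (c : Int × Int) :
    (c :: l).foldl pvSelA (none, -1) = l.foldl pvSelA (some c.2, c.1) := by
  simp [pvSelA, pvGtOpt]

-- ===== VERDICT (by name: the statement is the Claim_ definition above) =====
theorem find_busiest_period_spec : Claim_equal_find_busiest_period := by
  intro data _ hpre
  obtain ⟨hne, h1, h3⟩ := hpre
  unfold Spec_find_busiest_period find_busiest_period find_busiest_period_alt
  by_cases hlen : data.length = 1
  · simp [hlen]
  · simp only [hlen, if_false]
    have hinv := build_invariant data 0 (-1) none (-1) 0 [] (h3 hlen) (by simp)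
    rcases hA : data.foldl pvStepA (0, none, -1, -1, 0) with ⟨cn, mn, bt, pt, tm⟩
    rcases hB : data.foldl pvStepBuild ([], 0, -1) with ⟨cands, running, prev⟩
    simp only [hA, hB] at hinv ⊢
    obtain ⟨e1, e2, e3, e4⟩ := hinv
    have etm : tm = pt := e3 hne
    rw [etm, ← e1, ← e2]
    rcases hc : cands ++ [(pt, cn)] with _ | ⟨c, rest⟩
    · simp at hc
    · have key : (cands ++ [(pt, cn)]).foldl pvSelA (none, -1)
          = (some (rest.foldl pvSelect c).2, (rest.foldl pvSelect c).1) := by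
        rw [hc, selA_head, select_eq]
      rw [List.foldl_append, ← e4] at key
      simp only [List.foldl_cons, List.foldl_nil, pvSelA] at key
      have key2 : (if pvGtOpt cn mn then pt else bt) = (rest.foldl pvSelect c).1 := by
        by_cases hg : pvGtOpt cn mn
        · simp only [hg, if_true] at key ⊢
          exact congrArg Prod.snd key
        · simp only [hg, if_false, Bool.false_eq_true] at key ⊢
          exact congrArg Prod.snd key
      rw [key2]
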